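-- pv_equiv track=rewrite | github.com/gourav10/LeetCodeNotes | SpyDetected.py | SpyDetect
-- ===== SOURCE A (Python) =====
-- from typing import DefaultDict, List
-- from typing import List
--
-- def SpyDetect(arr:List):
--     lookUp=dict()
--
--     for item in arr:
--         if item in lookUp:
--             lookUp[item]+=1
--         else:
--             lookUp[item]=1
--
--     for key in lookUp:
--         if(lookUp[key]==1):
--             return arr.index(key)+1
--     return -1
-- ===== SOURCE B (Python) =====
-- def SpyDetect(arr):
--     for i, x in enumerate(arr):
--         if x not in arr[:i] and x not in arr[i+1:]:
--             return i + 1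
--     return -1
-- ===== Notes on version B (the rewrite author's own statement) =====
-- stated objective: alternative
-- what changed: B drops the frequency dictionary entirely: it scans positions left to right and returns i+1 at the first element that occurs in neither arr[:i] nor arr[i+1:], trading A's O(n) hash table for O(1) extra space at O(n^2) time.
import Mathlib
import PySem

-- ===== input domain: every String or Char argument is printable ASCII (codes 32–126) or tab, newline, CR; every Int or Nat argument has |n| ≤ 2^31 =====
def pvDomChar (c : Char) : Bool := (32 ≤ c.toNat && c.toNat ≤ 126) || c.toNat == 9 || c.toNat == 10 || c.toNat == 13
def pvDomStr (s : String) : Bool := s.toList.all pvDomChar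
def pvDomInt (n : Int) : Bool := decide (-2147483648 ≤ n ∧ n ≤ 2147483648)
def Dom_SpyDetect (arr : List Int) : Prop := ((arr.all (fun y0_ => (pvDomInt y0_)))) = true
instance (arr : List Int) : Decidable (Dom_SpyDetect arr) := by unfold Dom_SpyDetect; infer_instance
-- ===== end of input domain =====

-- B drops the frequency dictionary: a direct scan over positions, returning i+1 at the
-- first element occurring in neither arr[:i] nor arr[i+1:] (O(1) extra space, O(n^2) time).

-- ===== PORT A =====
-- the 'for key in lookUp' loop; lookUp[key] is a present-key lookup (key ∈ keys), ported as getD;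
-- arr.index(key) cannot fail since every key came from arr, the 'none' branch is unreachable (-1 arbitrary)
def spyKeyLoop (arr : List Int) (d : PySem.Dict Int Int) : List Int → Int
  | [] => -1
  | k :: ks =>
    if d.getD k 0 == 1 then
      match PySem.List.index? arr k with
      | some i => (i : Int) + 1
      | none => -1
    else spyKeyLoop arr d ks

def SpyDetect (arr : List Int) : Int :=
  let lookUp := arr.foldl
    (fun d item => if d.contains item then d.modify item 0 (· + 1) else d.insert item 1)
    PySem.Dict.empty
  spyKeyLoop arr lookUp lookUp.keys

-- ===== PORT B =====
-- the enumerate loop; x not in arr[:i] / arr[i+1:] via slices of the full list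
def spyBruteLoop (arr : List Int) : List Int → Int → Int
  | [], _ => -1
  | x :: t, i =>
    if !(PySem.List.slice arr none (some i)).contains x
        && !(PySem.List.slice arr (some (i + 1)) none).contains x
    then i + 1
    else spyBruteLoop arr t (i + 1)

def SpyDetect_alt (arr : List Int) : Int := spyBruteLoop arr arr 0

-- ===== PRECONDITION & SPEC =====
def Spec_SpyDetect (arr : List Int) (out : Int) : Prop := out = SpyDetect_alt arr
instance (arr : List Int) (out : Int) : Decidable (Spec_SpyDetect arr out) := by unfold Spec_SpyDetect; infer_instance

-- ===== CLAIM (what is proved, stated in full; the proofs are below) =====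
def Claim_equal_SpyDetect : Prop := ∀ (arr : List Int), Dom_SpyDetect arr → Spec_SpyDetect arr (SpyDetect arr)

-- ===== LEMMAS AND PROOFS =====

-- A's dict-building step is exactly the Counter step
lemma spy_step_eq (d : PySem.Dict Int Int) (x : Int) :
    (if d.contains x then d.modify x 0 (· + 1) else d.insert x 1) = d.modify x 0 (· + 1) := by
  by_cases h : d.contains x = true
  · simp [h]
  · have hg : d.get? x = none := by
      rw [PySem.Dict.get?_eq_none_iff_contains]
      simpa using h
    simp [h, PySem.Dict.modify, PySem.Dict.getD, hg]

lemma spy_fold_counter (arr : List Int) :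
    arr.foldl (fun d item => if d.contains item then d.modify item 0 (· + 1) else d.insert item 1)
      PySem.Dict.empty = PySem.Dict.counter arr := by
  simp only [spy_step_eq]
  rw [PySem.Dict.counter_eq_foldl]

-- A's key loop is find? over the keys
lemma spyKeyLoop_eq_find? (arr : List Int) (d : PySem.Dict Int Int) (ks : List Int) :
    spyKeyLoop arr d ks =
      match ks.find? (fun k => d.getD k 0 == 1) with
      | some k => (match PySem.List.index? arr k with
                   | some i => (i : Int) + 1
                   | none => -1)
      | none => -1 := by
  induction ks with
  | nil => rfl
  | cons k ks ih =>
    by_cases h : (d.getD k 0 == 1) = true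
    · simp [spyKeyLoop, List.find?, h]
    · simp only [spyKeyLoop, List.find?, h, if_neg, Bool.false_eq_true, not_false_iff]
      simpa [h] using ih

-- filtering away elements that cannot satisfy p does not change find?
lemma find?_filter_of_imp {α : Type} (p q : α → Bool) (l : List α)
    (h : ∀ a, p a = true → q a = true) : (l.filter q).find? p = l.find? p := by
  induction l with
  | nil => rfl
  | cons x t ih =>
    by_cases hq : q x = true
    · by_cases hp : p x = true
      · simp [List.filter, hq, List.find?, hp]
      · simp [List.filter, hq, List.find?, hp, ih]
    · have hp : p x = false := by
        cases hpx : p x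
        · rfl
        · exact absurd (h x hpx) hq
      simp [List.filter, hq, List.find?, hp, ih]

-- the Set.add foldl with any accumulator, in terms of the plain dedup
lemma set_foldl_add (t : List Int) (acc : List Int) :
    t.foldl PySem.Set.add acc
      = acc ++ (PySem.List.dedup t).filter (fun y => !(acc.contains y)) := by
  induction t generalizing acc with
  | nil => simp [PySem.List.dedup, PySem.Set.ofList]
  | cons x t ih =>
    have hded : PySem.List.dedup (x :: t)
        = [x] ++ (PySem.List.dedup t).filter (fun y => !(([x] : List Int).contains y)) := by
      show PySem.Set.ofList (x :: t) = _
      rw [PySem.Set.ofList_eq_foldl]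
      show (List.foldl PySem.Set.add (PySem.Set.add [] x) t) = _
      have h1 : PySem.Set.add ([] : List Int) x = [x] := by rfl
      rw [h1, ih]
    rw [List.foldl_cons]
    by_cases hc : acc.contains x = true
    · have hm : x ∈ acc := List.mem_of_elem_eq_true hc
      have hadd : PySem.Set.add acc x = acc := by simp [PySem.Set.add, hm]
      rw [hadd, ih, hded]
      congr 1
      rw [List.filter_append, List.filter_filter]
      simp only [List.filter_cons, List.filter_nil]
      have hx' : (!acc.contains x) = false := by simp [hm]
      simp only [hx', Bool.false_eq_true, if_false, List.nil_append]
      apply List.filter_congr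
      intro a _
      by_cases hax : a = x
      · subst hax; simp [hm]
      · simp [hax]
    · have hm : x ∉ acc := fun m => hc (List.elem_eq_true_of_mem m)
      have hadd : PySem.Set.add acc x = acc ++ [x] := by simp [PySem.Set.add, hm]
      rw [hadd, ih, hded]
      have hx' : (!acc.contains x) = true := by simpa using hm
      rw [List.filter_append, List.filter_filter]
      simp only [List.filter_cons, List.filter_nil, hx', if_true, List.append_assoc,
        List.singleton_append]
      congr 2
      apply List.filter_congr
      intro a _
      by_cases hax : a = x
      · subst hax; simp
      · simp [hax, Bool.and_comm]

-- PySem.List.dedup on a cons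
lemma dedup_cons (x : Int) (t : List Int) :
    PySem.List.dedup (x :: t) = x :: (PySem.List.dedup t).filter (fun y => !(y == x)) := by
  show PySem.Set.ofList (x :: t) = _
  rw [PySem.Set.ofList_eq_foldl]
  show (List.foldl PySem.Set.add (PySem.Set.add [] x) t) = _
  have h1 : PySem.Set.add ([] : List Int) x = [x] := by rfl
  rw [h1, set_foldl_add]
  simp only [List.singleton_append, List.cons.injEq, true_and]
  apply List.filter_congr
  intro a _
  by_cases hax : a = x
  · subst hax; simp
  · simp [hax]

-- find? over the dedup = find? over the list itself
lemma find?_dedup (p : Int → Bool) (l : List Int) :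
    (PySem.List.dedup l).find? p = l.find? p := by
  induction l with
  | nil => rfl
  | cons x t ih =>
    rw [dedup_cons]
    by_cases hp : p x = true
    · simp [List.find?, hp]
    · have hp' : p x = false := by cases h : p x; rfl; exact absurd h (by simp [hp])
      simp only [List.find?, hp']
      rw [find?_filter_of_imp p _ ((PySem.List.dedup t))
        (fun a ha => by
          cases hax : a == x
          · simp
          · exfalso; have : a = x := by simpa using hax
            subst this; exact absurd ha (by simp [hp']))]
      exact ih

-- the value-level find? with a first-occurrence index lookup equals findIdx?
lemma find?_index?_eq_findIdx? (p : Int → Bool) (l : List Int) :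
    (match l.find? p with
     | some k => (match PySem.List.index? l k with
                  | some i => (i : Int) + 1
                  | none => -1)
     | none => -1) =
    (match l.findIdx? p with
     | some j => (j : Int) + 1
     | none => -1) := by
  induction l with
  | nil => rfl
  | cons x t ih =>
    by_cases hp : p x = true
    · rw [List.find?_cons_of_pos hp, List.findIdx?_cons]
      simp [hp, List.idxOf?_cons]
    · have hp' : p x = false := by cases h : p x; rfl; exact absurd h (by simp [hp])
      rw [List.find?_cons_of_neg (by simp [hp']), List.findIdx?_cons]
      simp only [hp', if_false, Bool.false_eq_true]
      cases hf : t.find? p with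
      | none =>
        have hnone : t.findIdx? p = none := by
          rw [List.findIdx?_eq_none_iff]
          intro y hy
          have := List.find?_eq_none.mp hf y hy
          simpa using this
        simp [hnone]
      | some k =>
        have hkt : k ∈ t := List.mem_of_find?_eq_some hf
        have hpk : p k = true := List.find?_some hf
        have hkx : x ≠ k := by
          intro h; subst h; exact absurd hpk (by simp [hp'])
        have hidx : ∃ i, PySem.List.index? t k = some i := by
          have := PySem.List.index?_isSome_iff (xs := t) (v := k) |>.mpr hkt
          exact Option.isSome_iff_exists.mp this
        obtain ⟨i, hi⟩ := hidx
        have hcons : PySem.List.index? (x :: t) k = some (i + 1) := by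
          rw [PySem.List.index?_cons_of_ne t hkx, hi]; rfl
        cases hfi : t.findIdx? p with
        | none =>
          exfalso
          exact absurd hpk (by simpa using List.findIdx?_eq_none_iff.mp hfi k hkt)
        | some j =>
          have hihv := ih
          simp only [hf, hfi, hi] at hihv
          simp only [hcons, Option.map_some]
          have hij : i = j := by
            have hn : i + 1 = j + 1 := by exact_mod_cast hihv
            omega
          rw [hij]

-- A in closed form: 1 + first index of an element of count 1 (or -1)
lemma spyA_eq_findIdx? (arr : List Int) :
    SpyDetect arr =
      match arr.findIdx? (fun x => arr.count x == 1) with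
      | some j => (j : Int) + 1
      | none => -1 := by
  unfold SpyDetect
  rw [spy_fold_counter, spyKeyLoop_eq_find?, PySem.Dict.keys_counter]
  have hded : PySem.Set.ofList arr = PySem.List.dedup arr := by
    simp [PySem.List.dedup_eq_ofList]
  rw [hded, find?_dedup]
  have hpred : (fun k => (PySem.Dict.counter arr).getD k 0 == 1)
      = (fun k => arr.count k == 1) := by
    funext k
    rw [PySem.Dict.getD_counter]
    cases h : (arr.count k == 1)
    · simp at h ⊢; omega
    · simp at h ⊢; omega
  rw [hpred, find?_index?_eq_findIdx? (fun k => arr.count k == 1) arr]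

-- B's loop invariant: scanning rest at offset pre.length computes the same findIdx? formula
lemma spyBruteLoop_inv (arr pre rest : List Int) (h : arr = pre ++ rest) :
    spyBruteLoop arr rest (pre.length : Int) =
      match rest.findIdx? (fun x => arr.count x == 1) with
      | some j => (pre.length : Int) + (j : Int) + 1
      | none => -1 := by
  induction rest generalizing pre with
  | nil => rfl
  | cons x t ih =>
    have hsl1 : PySem.List.slice arr none (some (pre.length : Int)) = pre := by
      rw [PySem.List.slice_to_natCast]
      simp [h]
    have hsl2 : PySem.List.slice arr (some ((pre.length : Int) + 1)) none = t := by
      have : ((pre.length : Int) + 1) = ((pre.length + 1 : Nat) : Int) := by push_cast; ring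
      rw [this, PySem.List.slice_from_natCast, h]
      rw [show pre ++ x :: t = (pre ++ [x]) ++ t by simp]
      rw [show pre.length + 1 = (pre ++ [x]).length by simp]
      exact List.drop_left
    have hcount : arr.count x = pre.count x + 1 + t.count x := by
      subst h
      simp [List.count_append]
      ring
    have hpred : (!pre.contains x && !t.contains x) = (arr.count x == 1) := by
      by_cases h1 : x ∈ pre
      · have : arr.count x ≠ 1 := by
          have := List.count_pos_iff.mpr h1
          omega
        simp [h1, this]
      · by_cases h2 : x ∈ t
        · have : arr.count x ≠ 1 := by
            have := List.count_pos_iff.mpr h2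
            omega
          simp [h1, h2, this]
        · have e1 : pre.count x = 0 := List.count_eq_zero.mpr h1
          have e2 : t.count x = 0 := List.count_eq_zero.mpr h2
          have : arr.count x = 1 := by omega
          simp [h1, h2, this]
    rw [show spyBruteLoop arr (x :: t) (pre.length : Int)
        = if !(PySem.List.slice arr none (some (pre.length : Int))).contains x
              && !(PySem.List.slice arr (some ((pre.length : Int) + 1)) none).contains x
          then (pre.length : Int) + 1
          else spyBruteLoop arr t ((pre.length : Int) + 1) from rfl]
    rw [hsl1, hsl2, hpred, List.findIdx?_cons]
    by_cases hc : (arr.count x == 1) = true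
    · simp [hc]
    · have hc' : (arr.count x == 1) = false := by simpa using hc
      simp only [hc', Bool.false_eq_true, if_false]
      have hlen : ((pre.length : Int) + 1) = (((pre ++ [x]).length : Nat) : Int) := by
        simp
      rw [hlen, ih (pre ++ [x]) (by simp [h])]
      cases hfi : t.findIdx? (fun x => arr.count x == 1) with
      | none => simp
      | some j => simp; ring

lemma spyB_eq_findIdx? (arr : List Int) :
    SpyDetect_alt arr =
      match arr.findIdx? (fun x => arr.count x == 1) with
      | some j => (j : Int) + 1
      | none => -1 := by
  unfold SpyDetect_alt
  have := spyBruteLoop_inv arr [] arr (by simp)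
  simp only [List.length_nil, Nat.cast_zero] at this
  rw [this]
  cases h : arr.findIdx? (fun x => arr.count x == 1) with
  | none => rfl
  | some j => simp

-- ===== VERDICT (by name: the statement is the Claim_ definition above) =====
theorem SpyDetect_spec : Claim_equal_SpyDetect := by
  intro arr _
  show SpyDetect arr = SpyDetect_alt arr
  rw [spyA_eq_findIdx?, spyB_eq_findIdx?]
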